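-- pv_equiv track=rewrite | github.com/Favourel/ogamechanic-api | ogamechanic/middleware/audit_middleware.py | _infer_audit_config
-- ===== SOURCE A (Python) =====
-- def _infer_audit_config(path, method):
--     """Infer audit configuration from path and method."""
--     config = {
--         'category': 'business_critical',
--         'severity': 'medium',
--         'action': f'{method.lower()}_request'
--     }
--
--     # Adjust based on keywords in path
--     path_lower = path.lower()
--
--     if any(word in path_lower for word in ['payment', 'transaction', 'withdraw', 'deposit']):
--         config['category'] = 'transaction'
--         config['severity'] = 'critical'
--     elif any(word in path_lower for word in ['login', 'logout', 'register']):
--         config['category'] = 'authentication'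
--         config['severity'] = 'medium'
--     elif any(word in path_lower for word in ['password', 'security']):
--         config['category'] = 'security'
--         config['severity'] = 'high'
--     elif any(word in path_lower for word in ['approve', 'reject', 'admin']):
--         config['category'] = 'authorization'
--         config['severity'] = 'high'
--     elif any(word in path_lower for word in ['document', 'verify', 'kyc']):
--         config['category'] = 'compliance'
--         config['severity'] = 'high'
--     elif any(word in path_lower for word in ['delete', 'remove']):
--         config['severity'] = 'high'
--
--     return config
-- ===== SOURCE B (Python) =====
-- # B: flat keyword->rank map, aggregate with min over matched ranks, then table lookup; objective: alternative.
-- _KW = {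
--     'payment': 0, 'transaction': 0, 'withdraw': 0, 'deposit': 0,
--     'login': 1, 'logout': 1, 'register': 1,
--     'password': 2, 'security': 2,
--     'approve': 3, 'reject': 3, 'admin': 3,
--     'document': 4, 'verify': 4, 'kyc': 4,
--     'delete': 5, 'remove': 5,
-- }
-- _CATS = ['transaction', 'authentication', 'security', 'authorization',
--          'compliance', 'business_critical', 'business_critical']
-- _SEVS = ['critical', 'medium', 'high', 'high', 'high', 'high', 'medium']
--
--
-- def _infer_audit_config(path, method):
--     pl = path.lower()
--     i = min([r for k, r in _KW.items() if k in pl], default=6)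
--     return {
--         'category': _CATS[i],
--         'severity': _SEVS[i],
--         'action': method.lower() + '_request',
--     }
-- ===== Notes on version B (the rewrite author's own statement) =====
-- stated objective: alternative
-- what changed: Replaces the six-branch first-match if/elif chain of dict mutations with a flat keyword-to-rank map aggregated by taking the minimum matched rank, then a table lookup of category/severity by that rank.
import Mathlib
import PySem

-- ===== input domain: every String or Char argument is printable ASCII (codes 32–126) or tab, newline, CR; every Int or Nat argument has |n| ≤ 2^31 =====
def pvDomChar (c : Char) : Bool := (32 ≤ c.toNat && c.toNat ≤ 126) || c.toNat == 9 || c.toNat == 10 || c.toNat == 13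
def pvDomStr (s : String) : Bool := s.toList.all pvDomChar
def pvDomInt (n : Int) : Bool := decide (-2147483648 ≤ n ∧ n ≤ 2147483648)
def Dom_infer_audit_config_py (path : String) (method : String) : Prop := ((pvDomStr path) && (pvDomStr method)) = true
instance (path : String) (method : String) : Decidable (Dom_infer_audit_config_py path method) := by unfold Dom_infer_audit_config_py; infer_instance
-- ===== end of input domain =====

-- B replaces A's if/elif chain of dict mutations with a flat keyword→rank map aggregated by min and a table lookup (objective: alternative).

-- ===== PORT A =====
def infer_audit_config_py (path : String) (method : String) : List (String × String) :=
  let config : PySem.Dict String String :=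
    ((PySem.Dict.empty.insert "category" "business_critical").insert
      "severity" "medium").insert "action" (PySem.Str.lower method ++ "_request")
  let path_lower := PySem.Str.lower path
  let config :=
    if ["payment", "transaction", "withdraw", "deposit"].any (fun w => PySem.Str.isIn w path_lower) then
      (config.insert "category" "transaction").insert "severity" "critical"
    else if ["login", "logout", "register"].any (fun w => PySem.Str.isIn w path_lower) then
      (config.insert "category" "authentication").insert "severity" "medium"
    else if ["password", "security"].any (fun w => PySem.Str.isIn w path_lower) then
      (config.insert "category" "security").insert "severity" "high"
    else if ["approve", "reject", "admin"].any (fun w => PySem.Str.isIn w path_lower) then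
      (config.insert "category" "authorization").insert "severity" "high"
    else if ["document", "verify", "kyc"].any (fun w => PySem.Str.isIn w path_lower) then
      (config.insert "category" "compliance").insert "severity" "high"
    else if ["delete", "remove"].any (fun w => PySem.Str.isIn w path_lower) then
      config.insert "severity" "high"
    else config
  config.items

-- ===== PORT B =====
-- keyword → rule rank (the Python dict _KW, insertion order)
def pvKw : List (String × Nat) :=
  [("payment", 0), ("transaction", 0), ("withdraw", 0), ("deposit", 0),
   ("login", 1), ("logout", 1), ("register", 1),
   ("password", 2), ("security", 2),
   ("approve", 3), ("reject", 3), ("admin", 3),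
   ("document", 4), ("verify", 4), ("kyc", 4),
   ("delete", 5), ("remove", 5)]

def pvCats : List String :=
  ["transaction", "authentication", "security", "authorization",
   "compliance", "business_critical", "business_critical"]

def pvSevs : List String :=
  ["critical", "medium", "high", "high", "high", "high", "medium"]

def infer_audit_config_py_alt (path : String) (method : String) : List (String × String) :=
  let pl := PySem.Str.lower path
  -- i = min([r for k, r in _KW.items() if k in pl], default=6); _CATS[i]/_SEVS[i] always in range
  let i : Nat :=
    ((pvKw.filterMap (fun kv => if PySem.Str.isIn kv.1 pl then some kv.2 else none)).min?).getD 6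
  [("category", pvCats.getD i ""), ("severity", pvSevs.getD i ""),
   ("action", PySem.Str.lower method ++ "_request")]

-- ===== PRECONDITION & SPEC =====
def Spec_infer_audit_config_py (path : String) (method : String) (out : List (String × String)) : Prop := out = infer_audit_config_py_alt path method
instance (path : String) (method : String) (out : List (String × String)) : Decidable (Spec_infer_audit_config_py path method out) := by unfold Spec_infer_audit_config_py; infer_instance

-- ===== CLAIM (what is proved, stated in full; the proofs are below) =====
def Claim_equal_infer_audit_config_py : Prop := ∀ (path : String) (method : String), Dom_infer_audit_config_py path method → Spec_infer_audit_config_py path method (infer_audit_config_py path method)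

-- ===== LEMMAS AND PROOFS =====

-- A's result as a rank, from the six group tests
def pvIdxA (g1 g2 g3 g4 g5 g6 : Bool) : Nat :=
  if g1 then 0 else if g2 then 1 else if g3 then 2 else if g4 then 3
  else if g5 then 4 else if g6 then 5 else 6

-- B's rank, from a list of (matched?, rank) pairs
def pvMinIdx (l : List (Bool × Nat)) : Nat :=
  ((l.filterMap (fun x => if x.1 then some x.2 else none)).min?).getD 6

def pvOut (i : Nat) (method : String) : List (String × String) :=
  [("category", pvCats.getD i ""), ("severity", pvSevs.getD i ""),
   ("action", PySem.Str.lower method ++ "_request")]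

-- B's comprehension over the keyword map, rewritten with the match bits paired in
theorem pvB_zip (l : List (String × Nat)) (f : String → Bool) :
    l.filterMap (fun kv => if f kv.1 then some kv.2 else none)
      = (l.map (fun kv => (f kv.1, kv.2))).filterMap (fun x => if x.1 then some x.2 else none) := by
  rw [List.filterMap_map]
  rfl

theorem pvFoldlMin (F : List Nat) : ∀ n : Nat, (∀ x ∈ F, n ≤ x) → F.foldl min n = n := by
  induction F with
  | nil => intro n _; rfl
  | cons x F ih =>
    intro n h
    simp only [List.foldl_cons]
    rw [Nat.min_eq_left (h x (by simp))]
    exact ih n (fun y hy => h y (by simp [hy]))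

-- one keyword block: min over (block of rank n) ++ tail with ranks ≥ n = n if any bit is set, else min of the tail
theorem pvBlock (bs : List Bool) (n : Nat) (t : List (Bool × Nat)) (ht : ∀ p ∈ t, n ≤ p.2) :
    pvMinIdx (bs.map (fun b => (b, n)) ++ t) = if bs.any id then n else pvMinIdx t := by
  induction bs with
  | nil => simp
  | cons b bs ih =>
    cases b
    · have h1 : pvMinIdx ((false :: bs).map (fun b => (b, n)) ++ t)
          = pvMinIdx (bs.map (fun b => (b, n)) ++ t) := rfl
      rw [h1, ih]
      simp
    · have h1 : pvMinIdx ((true :: bs).map (fun b => (b, n)) ++ t)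
          = ((bs.map (fun b => (b, n)) ++ t).filterMap
              (fun x => if x.1 then some x.2 else none)).foldl min n := rfl
      have hF : ∀ x ∈ (bs.map (fun b => (b, n)) ++ t).filterMap
          (fun x => if x.1 then some x.2 else none), n ≤ x := by
        intro x hx
        rcases List.mem_filterMap.mp hx with ⟨p, hp, hpx⟩
        rcases List.mem_append.mp hp with hm | hmt
        · rcases List.mem_map.mp hm with ⟨b', _, rfl⟩
          by_cases hb : b' = true
          · simp [hb] at hpx
            omega
          · simp [hb] at hpx
        · by_cases hb : p.1 = true
          · simp [hb] at hpx
            exact hpx ▸ ht p hmt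
          · simp [hb] at hpx
      rw [h1, pvFoldlMin _ n hF]
      simp

-- bridge: the tail-rank hypothesis of pvBlock as a computation, so call sites discharge it by rfl
theorem pvBlock' (bs : List Bool) (n : Nat) (t : List (Bool × Nat))
    (ht : t.all (fun p => decide (n ≤ p.2)) = true) :
    pvMinIdx (bs.map (fun b => (b, n)) ++ t) = if bs.any id then n else pvMinIdx t :=
  pvBlock bs n t (fun p hp => of_decide_eq_true (List.all_eq_true.mp ht p hp))

-- the 17-variable core equivalence: min matched rank = first matching group
theorem pvCore_eq (b1 b2 b3 b4 b5 b6 b7 b8 b9 b10 b11 b12 b13 b14 b15 b16 b17 : Bool) :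
    pvMinIdx [(b1, 0), (b2, 0), (b3, 0), (b4, 0), (b5, 1), (b6, 1), (b7, 1),
              (b8, 2), (b9, 2), (b10, 3), (b11, 3), (b12, 3), (b13, 4), (b14, 4), (b15, 4),
              (b16, 5), (b17, 5)]
      = pvIdxA (b1 || (b2 || (b3 || b4))) (b5 || (b6 || b7)) (b8 || b9) (b10 || (b11 || b12))
          (b13 || (b14 || b15)) (b16 || b17) := by
  have e1 : ([(b1, 0), (b2, 0), (b3, 0), (b4, 0), (b5, 1), (b6, 1), (b7, 1),
      (b8, 2), (b9, 2), (b10, 3), (b11, 3), (b12, 3), (b13, 4), (b14, 4), (b15, 4),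
      (b16, 5), (b17, 5)] : List (Bool × Nat))
      = [b1, b2, b3, b4].map (fun b => (b, 0)) ++ [(b5, 1), (b6, 1), (b7, 1),
        (b8, 2), (b9, 2), (b10, 3), (b11, 3), (b12, 3), (b13, 4), (b14, 4), (b15, 4),
        (b16, 5), (b17, 5)] := rfl
  have e2 : ([(b5, 1), (b6, 1), (b7, 1), (b8, 2), (b9, 2), (b10, 3), (b11, 3), (b12, 3),
      (b13, 4), (b14, 4), (b15, 4), (b16, 5), (b17, 5)] : List (Bool × Nat))
      = [b5, b6, b7].map (fun b => (b, 1)) ++ [(b8, 2), (b9, 2), (b10, 3), (b11, 3), (b12, 3),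
        (b13, 4), (b14, 4), (b15, 4), (b16, 5), (b17, 5)] := rfl
  have e3 : ([(b8, 2), (b9, 2), (b10, 3), (b11, 3), (b12, 3), (b13, 4), (b14, 4), (b15, 4),
      (b16, 5), (b17, 5)] : List (Bool × Nat))
      = [b8, b9].map (fun b => (b, 2)) ++ [(b10, 3), (b11, 3), (b12, 3), (b13, 4), (b14, 4),
        (b15, 4), (b16, 5), (b17, 5)] := rfl
  have e4 : ([(b10, 3), (b11, 3), (b12, 3), (b13, 4), (b14, 4), (b15, 4), (b16, 5), (b17, 5)]
      : List (Bool × Nat))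
      = [b10, b11, b12].map (fun b => (b, 3)) ++ [(b13, 4), (b14, 4), (b15, 4), (b16, 5), (b17, 5)] := rfl
  have e5 : ([(b13, 4), (b14, 4), (b15, 4), (b16, 5), (b17, 5)] : List (Bool × Nat))
      = [b13, b14, b15].map (fun b => (b, 4)) ++ [(b16, 5), (b17, 5)] := rfl
  have e6 : ([(b16, 5), (b17, 5)] : List (Bool × Nat))
      = [b16, b17].map (fun b => (b, 5)) ++ [] := rfl
  rw [e1, pvBlock' _ _ _ rfl, e2, pvBlock' _ _ _ rfl, e3, pvBlock' _ _ _ rfl,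
     e4, pvBlock' _ _ _ rfl, e5, pvBlock' _ _ _ rfl, e6, pvBlock' _ _ _ rfl]
  have e0 : pvMinIdx ([] : List (Bool × Nat)) = 6 := rfl
  rw [e0]
  simp only [pvIdxA, List.any_cons, List.any_nil, id_eq, Bool.or_false]

theorem pvA_eval (path method : String) :
    infer_audit_config_py path method
      = pvOut (pvIdxA
          (["payment", "transaction", "withdraw", "deposit"].any (fun w => PySem.Str.isIn w (PySem.Str.lower path)))
          (["login", "logout", "register"].any (fun w => PySem.Str.isIn w (PySem.Str.lower path)))
          (["password", "security"].any (fun w => PySem.Str.isIn w (PySem.Str.lower path)))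
          (["approve", "reject", "admin"].any (fun w => PySem.Str.isIn w (PySem.Str.lower path)))
          (["document", "verify", "kyc"].any (fun w => PySem.Str.isIn w (PySem.Str.lower path)))
          (["delete", "remove"].any (fun w => PySem.Str.isIn w (PySem.Str.lower path)))) method := by
  unfold infer_audit_config_py pvIdxA pvOut
  dsimp only
  split_ifs <;> rfl

theorem pvB_eval (path method : String) :
    infer_audit_config_py_alt path method
      = pvOut (pvMinIdx (pvKw.map (fun kv => (PySem.Str.isIn kv.1 (PySem.Str.lower path), kv.2)))) method := by
  unfold infer_audit_config_py_alt pvOut pvMinIdx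
  dsimp only
  rw [pvB_zip pvKw (fun w => PySem.Str.isIn w (PySem.Str.lower path))]

-- ===== VERDICT (by name: the statement is the Claim_ definition above) =====
theorem infer_audit_config_py_spec : Claim_equal_infer_audit_config_py := by
  intro path method _
  unfold Spec_infer_audit_config_py
  rw [pvA_eval, pvB_eval]
  have hm : pvKw.map (fun kv => (PySem.Str.isIn kv.1 (PySem.Str.lower path), kv.2))
      = [(PySem.Str.isIn "payment" (PySem.Str.lower path), 0),
         (PySem.Str.isIn "transaction" (PySem.Str.lower path), 0),
         (PySem.Str.isIn "withdraw" (PySem.Str.lower path), 0),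
         (PySem.Str.isIn "deposit" (PySem.Str.lower path), 0),
         (PySem.Str.isIn "login" (PySem.Str.lower path), 1),
         (PySem.Str.isIn "logout" (PySem.Str.lower path), 1),
         (PySem.Str.isIn "register" (PySem.Str.lower path), 1),
         (PySem.Str.isIn "password" (PySem.Str.lower path), 2),
         (PySem.Str.isIn "security" (PySem.Str.lower path), 2),
         (PySem.Str.isIn "approve" (PySem.Str.lower path), 3),
         (PySem.Str.isIn "reject" (PySem.Str.lower path), 3),
         (PySem.Str.isIn "admin" (PySem.Str.lower path), 3),
         (PySem.Str.isIn "document" (PySem.Str.lower path), 4),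
         (PySem.Str.isIn "verify" (PySem.Str.lower path), 4),
         (PySem.Str.isIn "kyc" (PySem.Str.lower path), 4),
         (PySem.Str.isIn "delete" (PySem.Str.lower path), 5),
         (PySem.Str.isIn "remove" (PySem.Str.lower path), 5)] := rfl
  rw [hm, pvCore_eq]
  simp only [List.any_cons, List.any_nil, Bool.or_false]
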